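-- pv_equiv track=rewrite | github.com/geetickachauhan/relation-extraction | relation_extraction/data/converters/converter_i2b2.py | get_concepts_by_linenum
-- ===== SOURCE A (Python) =====
-- def get_line_number_and_word_number(position):
--     split = position.split(':')
--     return split[0], split[1]
--
-- def get_concepts_by_linenum(concept_dict):
--     concept_dict_by_linenum = {}
--     for key in concept_dict.keys():
--         linenum, _ = get_line_number_and_word_number(key)
--         linenum = str(linenum)
--         if linenum in concept_dict_by_linenum:
--              concept_dict_by_linenum[linenum].append(key)
--         else:
--             concept_dict_by_linenum[linenum] = [key]
--     return concept_dict_by_linenum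
-- ===== SOURCE B (Python) =====
-- def get_line_number_and_word_number(position):
--     split = position.split(':')
--     return split[0], split[1]
--
-- def get_concepts_by_linenum(concept_dict):
--     keys = list(concept_dict.keys())
--     nums = [get_line_number_and_word_number(key)[0] for key in keys]
--     pairs = list(zip(keys, nums))
--     return {ln: [k for k, n in pairs if n == ln] for ln in dict.fromkeys(nums)}
-- ===== Notes on version B (the rewrite author's own statement) =====
-- stated objective: alternative
-- what changed: A buckets keys one by one into a dict with a membership test per key; B computes every key's line number once via the module helper, takes the distinct line numbers with dict.fromkeys, and builds each group with one declarative comprehension over the (key, linenum) pairs.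
import Mathlib
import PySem

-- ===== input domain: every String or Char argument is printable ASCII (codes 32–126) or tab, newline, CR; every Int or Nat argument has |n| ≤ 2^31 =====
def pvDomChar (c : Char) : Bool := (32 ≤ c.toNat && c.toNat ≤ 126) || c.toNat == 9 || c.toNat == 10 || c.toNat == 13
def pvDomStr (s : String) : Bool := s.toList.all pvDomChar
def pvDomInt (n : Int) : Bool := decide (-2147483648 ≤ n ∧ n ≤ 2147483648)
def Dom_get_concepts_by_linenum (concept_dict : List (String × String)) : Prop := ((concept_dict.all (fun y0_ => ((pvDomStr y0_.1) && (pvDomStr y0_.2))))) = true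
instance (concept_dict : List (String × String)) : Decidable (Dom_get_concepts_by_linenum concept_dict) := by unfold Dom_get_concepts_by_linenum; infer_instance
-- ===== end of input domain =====

-- B replaces A's one-pass incremental bucketing by a declarative build: distinct line
-- numbers first (dict.fromkeys), then one comprehension per group ("alternative", not faster).
-- ===== PORT A =====
-- helper: `return split[0], split[1]` — split[0] always exists (split(':') is never
-- empty); split[1] raises IndexError when the key has no ':' (excluded by Pre_), so it
-- is ported as an Option (none exactly where Python raises).
def get_line_number_and_word_number (position : String) : String × Option String :=
  let split := (PySem.Str.split? position ":").getD []
  (PySem.List.pyGetD split 0 "", PySem.List.pyGet? split 1)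

def get_concepts_by_linenum (concept_dict : List (String × String)) : List (String × List String) :=
  let d := PySem.Dict.ofList concept_dict
  (d.keys.foldl (fun (acc : PySem.Dict String (List String)) key =>
      let linenum := (get_line_number_and_word_number key).1
      if acc.contains linenum then
        -- concept_dict_by_linenum[linenum].append(key): in-place append to the stored list
        acc.modify linenum [] (fun l => l ++ [key])
      else
        acc.insert linenum [key])
    PySem.Dict.empty).items

-- ===== PORT B =====
def get_concepts_by_linenum_alt (concept_dict : List (String × String)) : List (String × List String) :=
  let keys := (PySem.Dict.ofList concept_dict).keys
  let nums := keys.map (fun key => (get_line_number_and_word_number key).1)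
  let pairs := keys.zip nums
  (PySem.List.dedup nums).map (fun ln => (ln, (pairs.filter (fun p => p.2 == ln)).map Prod.fst))

-- ===== PRECONDITION & SPEC =====
-- Pre_: every key contains ':'; on a key without ':' Python A raises IndexError (split[1]).
def Pre_get_concepts_by_linenum (concept_dict : List (String × String)) : Prop :=
  concept_dict.all (fun p => PySem.Str.isIn ":" p.1) = true
instance (concept_dict : List (String × String)) : Decidable (Pre_get_concepts_by_linenum concept_dict) := by unfold Pre_get_concepts_by_linenum; infer_instance
def pvWitness_get_concepts_by_linenum : (List (String × String)) :=
  [("1:2", "problem"), ("1:5", "test"), ("2:0", "problem")]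

def Spec_get_concepts_by_linenum (concept_dict : List (String × String)) (out : List (String × List String)) : Prop := out = get_concepts_by_linenum_alt concept_dict
instance (concept_dict : List (String × String)) (out : List (String × List String)) : Decidable (Spec_get_concepts_by_linenum concept_dict out) := by unfold Spec_get_concepts_by_linenum; infer_instance

-- ===== CLAIM (what is proved, stated in full; the proofs are below) =====
def Claim_equal_get_concepts_by_linenum : Prop := ∀ (concept_dict : List (String × String)), Dom_get_concepts_by_linenum concept_dict → Pre_get_concepts_by_linenum concept_dict → Spec_get_concepts_by_linenum concept_dict (get_concepts_by_linenum concept_dict)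

-- ===== LEMMAS AND PROOFS =====

-- A's loop step: when the key is absent, `modify` and `insert [key]` build the same dict,
-- so the whole if-branch is one `modify`.
theorem step_eq_modify (d : PySem.Dict String (List String)) (ln k : String) :
    (if d.contains ln then d.modify ln [] (fun l => l ++ [k]) else d.insert ln [k])
      = d.modify ln [] (fun l => l ++ [k]) := by
  by_cases h : d.contains ln
  · simp [h]
  · have h' : d.contains ln = false := by simpa using h
    have h2 : d.getD ln ([] : List String) = [] :=
      PySem.Dict.getD_of_not_contains d [] h'
    simp [PySem.Dict.modify, PySem.Dict.insert, h', h2]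

theorem filtered_pairs (ks : List String) (f : String → String) (ln : String) :
    ((ks.map (fun k => (k, f k))).filter (fun p => p.2 == ln)).map Prod.fst
      = ks.filter (fun k => f k == ln) := by
  simp [List.filter_map, List.map_map, Function.comp_def]

theorem zip_map_self (ks : List String) (f : String → String) :
    ks.zip (ks.map f) = ks.map (fun k => (k, f k)) := by
  induction ks with
  | nil => rfl
  | cons a t ih => simp [ih]

-- the heart: A's grouping fold over any key list, itemized, is B's dedup-and-filter build
theorem grouping_fold_items (f : String → String) (ks : List String) :
    (ks.foldl (fun (acc : PySem.Dict String (List String)) k =>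
        if acc.contains (f k) then acc.modify (f k) [] (fun l => l ++ [k])
        else acc.insert (f k) [k]) PySem.Dict.empty).items
      = (PySem.List.dedup (ks.map f)).map
          (fun ln => (ln, ks.filter (fun k => f k == ln))) := by
  have hstep : ks.foldl (fun (acc : PySem.Dict String (List String)) k =>
      if acc.contains (f k) then acc.modify (f k) [] (fun l => l ++ [k])
      else acc.insert (f k) [k]) PySem.Dict.empty
      = ks.foldl (fun acc k => acc.modify (f k) [] (fun l => l ++ [k])) PySem.Dict.empty :=
    by apply PySem.List.foldl_congr_mem
       intro acc x _
       exact step_eq_modify acc (f x) x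
  rw [hstep]
  set d := ks.foldl (fun (acc : PySem.Dict String (List String)) k =>
      acc.modify (f k) [] (fun l => l ++ [k])) PySem.Dict.empty with hd
  have hnodup : d.keys.Nodup := by
    rw [hd]
    exact PySem.Dict.nodup_keys_foldl_modify_key ks f [] _ PySem.Dict.empty
      PySem.Dict.nodup_keys_empty
  have hkeys : d.keys = PySem.List.dedup (ks.map f) := by
    rw [hd, PySem.Dict.keys_foldl_modify_key]
    simp [PySem.Set.update, PySem.List.dedup_eq_ofList, PySem.Set.ofList_eq_foldl]
  have hpairs : ks.foldl (fun (acc : PySem.Dict String (List String)) k =>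
      acc.modify (f k) [] (fun l => l ++ [k])) PySem.Dict.empty
      = (ks.map (fun k => (f k, k))).foldl
          (fun acc p => acc.modify p.1 [] (fun l => l ++ [p.2])) PySem.Dict.empty := by
    rw [List.foldl_map]
  have hgetD : ∀ ln, d.getD ln [] = ks.filter (fun k => f k == ln) := by
    intro ln
    rw [hd, hpairs, PySem.Dict.getD_foldl_modify_append]
    simp [List.filter_map, List.map_map, Function.comp_def]
  rw [PySem.Dict.items_eq_map_keys d hnodup [], hkeys]
  exact List.map_congr_left (fun ln _ => by rw [hgetD ln])

-- ===== VERDICT (by name: the statement is the Claim_ definition above) =====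
theorem get_concepts_by_linenum_spec : Claim_equal_get_concepts_by_linenum := by
  intro cd _ _
  unfold Spec_get_concepts_by_linenum
  simp only [get_concepts_by_linenum, get_concepts_by_linenum_alt]
  rw [grouping_fold_items (fun k => (get_line_number_and_word_number k).1)
        (PySem.Dict.ofList cd).keys,
      zip_map_self]
  exact List.map_congr_left (fun ln _ => by rw [filtered_pairs])
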